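-- pv_equiv track=rewrite | github.com/BaeJihyun97/CodingTest | 프로그래머스/3/258709. 주사위 고르기/주사위 고르기.py | count
-- ===== SOURCE A (Python) =====
-- from itertools import combinations, product
--
-- def count(A, B):
--     count = 0
--     scoreAl, scoreBl = [], []
--     scoreAd, scoreBd = {}, {}
--
--     for comb in product(*A):
--         scoreAl.append(sum(comb))
--     for comb in product(*B):
--         scoreBl.append(sum(comb))
--
--     scoreAl.sort(reverse=True); scoreBl.sort(reverse=True);
--     indexA, indexB = 0, 0
--     scoreBl_len = len(scoreBl)
--     while indexA < len(scoreAl) and indexB < len(scoreBl):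
--
--         # scoreAl에 같은 숫자 세기
--         currAC = 1
--         currAV = scoreAl[indexA]
--         while indexA < len(scoreAl)-1:
--             if scoreAl[indexA+1] == currAV:
--                 currAC += 1
--                 indexA += 1
--             else: break
--
--         while indexB < len(scoreBl):
--             if currAV > scoreBl[indexB]:
--                 break
--             else:
--                 indexB += 1
--
--         count += currAC * (scoreBl_len - indexB)
--         indexA += 1
--
--     return count
-- ===== SOURCE B (Python) =====
-- def count(A, B):
--     # Convolve per-die sum distributions into frequency dicts, then count
--     # winning pairs by weighting over the (few) distinct sums.
--     def dist(dice):
--         d = {0: 1}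
--         for die in dice:
--             nd = {}
--             for s, c in d.items():
--                 for f in die:
--                     nd[s + f] = nd.get(s + f, 0) + c
--             d = nd
--         return d
--
--     dA = dist(A)
--     dB = dist(B)
--     total = 0
--     for a, ca in dA.items():
--         wins = 0
--         for b, cb in dB.items():
--             if b < a:
--                 wins += cb
--         total += ca * wins
--     return total
-- ===== Notes on version B (the rewrite author's own statement) =====
-- stated objective: faster
-- what changed: Replaces the full 6^n cartesian-product enumeration, descending sort and duplicate-grouping two-pointer merge by convolving per-die sum-frequency dictionaries (dynamic programming over distributions) and counting winning pairs with a weighted double loop over the few distinct sums.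
import Mathlib
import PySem

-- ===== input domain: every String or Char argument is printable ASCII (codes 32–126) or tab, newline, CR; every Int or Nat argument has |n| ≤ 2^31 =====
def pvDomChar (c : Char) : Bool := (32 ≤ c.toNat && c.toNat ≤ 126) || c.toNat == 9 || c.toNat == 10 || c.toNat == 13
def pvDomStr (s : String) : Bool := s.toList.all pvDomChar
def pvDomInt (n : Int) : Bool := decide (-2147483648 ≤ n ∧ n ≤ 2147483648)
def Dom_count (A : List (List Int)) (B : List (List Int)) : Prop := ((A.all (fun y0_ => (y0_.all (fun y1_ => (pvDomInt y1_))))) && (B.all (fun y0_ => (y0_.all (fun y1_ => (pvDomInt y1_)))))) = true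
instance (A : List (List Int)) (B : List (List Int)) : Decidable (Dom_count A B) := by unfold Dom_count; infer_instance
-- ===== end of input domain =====

-- B replaces A's full 6^n enumeration + sort + two-pointer merge by convolving per-die
-- sum-frequency dictionaries and a weighted double loop over the (few) distinct sums.

-- ===== PORT A =====
-- itertools.product(*ls), tuples in lexicographic order (each tuple as a List Int); exact
def pyProd (ls : List (List Int)) : List (List Int) :=
  ls.foldl (fun acc die => acc.flatMap (fun t => die.map (fun f => t ++ [f]))) [[]]

-- inner while loop counting the run of equal values starting at indexA (guard i < len-1 ↔ i+1 < len)
def grpA (la : List Int) (v : Int) (i : Nat) (c : Int) : Int × Nat :=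
  if h : i + 1 < la.length then
    if la[i + 1] = v then grpA la v (i + 1) (c + 1) else (c, i)
  else (c, i)
  termination_by la.length - i

theorem grpA_snd_ge (la : List Int) (v : Int) (i : Nat) (c : Int) : i ≤ (grpA la v i c).2 := by
  unfold grpA
  split
  next h =>
    split
    next => exact Nat.le_trans (Nat.le_succ i) (grpA_snd_ge la v (i + 1) (c + 1))
    next => exact Nat.le_refl i
  next => exact Nat.le_refl i
  termination_by la.length - i
  decreasing_by omega

-- inner while loop advancing indexB while not (currAV > scoreBl[indexB])
def advB (lb : List Int) (v : Int) (j : Nat) : Nat :=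
  if h : j < lb.length then
    if v > lb[j] then j else advB lb v (j + 1)
  else j
  termination_by lb.length - j

-- outer while loop of A
def loopA (la lb : List Int) (iA iB : Nat) (acc : Int) : Int :=
  if h : iA < la.length ∧ iB < lb.length then
    let v := la[iA]'h.1
    let p := grpA la v iA 1
    let iB' := advB lb v iB
    loopA la lb (p.2 + 1) iB' (acc + p.1 * ((lb.length : Int) - (iB' : Int)))
  else acc
  termination_by la.length - iA
  decreasing_by have := grpA_snd_ge la (la[iA]'h.1) iA 1; omega

def count (A : List (List Int)) (B : List (List Int)) : Int :=
  let scoreAl := (pyProd A).map (fun t => t.sum)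
  let scoreBl := (pyProd B).map (fun t => t.sum)
  let sAl := PySem.List.sorted scoreAl (fun x => x) true
  let sBl := PySem.List.sorted scoreBl (fun x => x) true
  loopA sAl sBl 0 0 0

-- ===== PORT B =====
-- dist(dice): convolve each die into a sum → frequency dictionary
def distConv (dice : List (List Int)) : PySem.Dict Int Int :=
  dice.foldl
    (fun d die =>
      d.items.foldl
        (fun nd sc =>
          die.foldl (fun nd f => nd.insert (sc.1 + f) (nd.getD (sc.1 + f) 0 + sc.2)) nd)
        PySem.Dict.empty)
    (PySem.Dict.ofList [(0, 1)])

def count_alt (A : List (List Int)) (B : List (List Int)) : Int :=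
  let dA := distConv A
  let dB := distConv B
  dA.items.foldl
    (fun total ac =>
      total + ac.2 * (dB.items.foldl (fun w bc => if bc.1 < ac.1 then w + bc.2 else w) 0))
    0

-- ===== PRECONDITION & SPEC =====
def Spec_count (A : List (List Int)) (B : List (List Int)) (out : Int) : Prop := out = count_alt A B
instance (A : List (List Int)) (B : List (List Int)) (out : Int) : Decidable (Spec_count A B out) := by unfold Spec_count; infer_instance

-- ===== CLAIM (what is proved, stated in full; the proofs are below) =====
def Claim_equal_count : Prop := ∀ (A : List (List Int)) (B : List (List Int)), Dom_count A B → Spec_count A B (count A B)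


-- ===== LEMMAS AND PROOFS =====

-- the common specification value: pairs (a, b) of product-sums with b < a, with multiplicity
def pairCount (la lb : List Int) : Int :=
  (la.map (fun a => ((lb.countP (fun b => decide (b < a)) : Nat) : Int))).sum


theorem map_sum_pyProd (ls : List (List Int)) (acc : List (List Int)) :
    ((ls.foldl (fun acc die => acc.flatMap (fun t => die.map (fun f => t ++ [f]))) acc).map
        (fun t => t.sum)) =
      ls.foldl (fun acc die => acc.flatMap (fun s => die.map (fun f => s + f)))
        (acc.map (fun t => t.sum)) := by
  induction ls generalizing acc with
  | nil => simp
  | cons die rest ih =>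
    simp only [List.foldl_cons]
    rw [ih]
    congr 1
    simp [List.map_flatMap, List.flatMap_map, List.map_map, Function.comp_def, List.sum_append]

theorem filterSum_eq_getD (l : List (Int × Int)) (v : Int)
    (h : (l.map Prod.fst).Nodup) :
    (((PySem.Dict.mk l).items.filter (fun p => p.1 = v)).map (fun p => p.2)).sum
      = (PySem.Dict.mk l).getD v 0 := by
  induction l with
  | nil => simp [PySem.Dict.getD, PySem.Dict.get?]
  | cons p rest ih =>
    simp only [List.map_cons, List.nodup_cons] at h
    have hg : (PySem.Dict.mk (p :: rest)).getD v 0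
        = if p.1 = v then p.2 else (PySem.Dict.mk rest).getD v 0 := by
      obtain ⟨k, c⟩ := p
      rw [PySem.Dict.getD_eq_get?_getD, PySem.Dict.get?_mk_cons]
      by_cases hk : k = v
      · simp [hk]
      · simp [hk, PySem.Dict.getD_eq_get?_getD]
    by_cases hv : p.1 = v
    · have hnil : rest.filter (fun q => q.1 = v) = [] := by
        rw [List.filter_eq_nil_iff]
        intro q hq hqv
        exact h.1 (List.mem_map.mpr ⟨q, hq, by rw [of_decide_eq_true hqv, hv]⟩)
      have hitems : (PySem.Dict.mk (p :: rest)).items = p :: rest := rfl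
      rw [hitems, hg, if_pos hv]
      simp [List.filter_cons, hv, hnil]
    · have hitems : (PySem.Dict.mk (p :: rest)).items = p :: rest := rfl
      rw [hitems, hg, if_neg hv]
      rw [← ih h.2]
      simp [hv]

theorem sum_map_split (S : List Int) (g : Int → Int) (k : Int) :
    (S.map g).sum
      = ((S.filter (fun x => x = k)).map g).sum + ((S.filter (fun x => ¬ x = k)).map g).sum := by
  induction S with
  | nil => simp
  | cons x t ih =>
    by_cases hx : x = k <;> simp [List.filter_cons, hx, ih] <;> ring

theorem sum_map_filter_eq (S : List Int) (g : Int → Int) (k : Int) :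
    ((S.filter (fun x => x = k)).map g).sum = (S.count k : Int) * g k := by
  induction S with
  | nil => simp
  | cons x t ih =>
    by_cases hx : x = k <;>
      simp [List.filter_cons, hx, List.count_cons, ih] <;> push_cast <;> ring

theorem weighted_sum (items : List (Int × Int)) (S : List Int) (g : Int → Int)
    (hnd : (items.map Prod.fst).Nodup)
    (hc : ∀ v, ((items.filter (fun p => p.1 = v)).map (fun p => p.2)).sum = (S.count v : Int)) :
    (items.map (fun p => p.2 * g p.1)).sum = (S.map g).sum := by
  induction items generalizing S with
  | nil =>
    cases S with
    | nil => simp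
    | cons x t =>
      have := hc x
      simp [List.count_cons_self] at this
      omega
  | cons p rest ih =>
    simp only [List.map_cons, List.nodup_cons] at hnd
    have hknotin : rest.filter (fun q => q.1 = p.1) = [] := by
      rw [List.filter_eq_nil_iff]
      intro q hq hqv
      exact hnd.1 (List.mem_map.mpr ⟨q, hq, by rw [of_decide_eq_true hqv]⟩)
    have hp : p.2 = (S.count p.1 : Int) := by
      have := hc p.1
      simpa [List.filter_cons, hknotin] using this
    have hrest : ∀ v, ((rest.filter (fun q => q.1 = v)).map (fun q => q.2)).sum
        = ((S.filter (fun x => ¬ x = p.1)).count v : Int) := by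
      intro v
      by_cases hv : v = p.1
      · subst hv
        have h0 : p.1 ∉ S.filter (fun x => ¬ x = p.1) := by simp [List.mem_filter]
        rw [hknotin, List.count_eq_zero.mpr h0]
        simp
      · have hne : ¬ p.1 = v := fun h => hv h.symm
        have hcv := hc v
        simp only [List.filter_cons, hne, decide_eq_true_eq, if_false] at hcv
        rw [hcv, List.count_filter (by simp [hv])]
    rw [List.map_cons, List.sum_cons, ih (S.filter (fun x => ¬ x = p.1)) hnd.2 hrest,
      sum_map_split S g p.1, sum_map_filter_eq, hp]

theorem getD_foldl_insertAdd (ps : List (Int × Int)) (d : PySem.Dict Int Int) (v : Int) :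
    (ps.foldl (fun nd p => nd.insert p.1 (nd.getD p.1 0 + p.2)) d).getD v 0
      = d.getD v 0 + ((ps.filter (fun p => p.1 = v)).map (fun p => p.2)).sum := by
  induction ps generalizing d with
  | nil => simp
  | cons p rest ih =>
    rw [List.foldl_cons, ih, PySem.Dict.getD_insert]
    by_cases hv : v = p.1
    · subst hv
      simp [List.filter_cons]
      ring
    · have : ¬ p.1 = v := fun h => hv h.symm
      simp [List.filter_cons, hv, this]

theorem inner_foldl_eq (die : List Int) (sc : Int × Int) (nd : PySem.Dict Int Int) :
    die.foldl (fun nd f => nd.insert (sc.1 + f) (nd.getD (sc.1 + f) 0 + sc.2)) nd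
      = (die.map (fun f => (sc.1 + f, sc.2))).foldl
          (fun nd p => nd.insert p.1 (nd.getD p.1 0 + p.2)) nd := by
  induction die generalizing nd with
  | nil => rfl
  | cons f rest ih => simp [List.foldl_cons, ih]

theorem nested_foldl_eq (items : List (Int × Int)) (die : List Int) (nd : PySem.Dict Int Int) :
    items.foldl
        (fun nd sc =>
          die.foldl (fun nd f => nd.insert (sc.1 + f) (nd.getD (sc.1 + f) 0 + sc.2)) nd) nd
      = (items.flatMap (fun sc => die.map (fun f => (sc.1 + f, sc.2)))).foldl
          (fun nd p => nd.insert p.1 (nd.getD p.1 0 + p.2)) nd := by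
  induction items generalizing nd with
  | nil => rfl
  | cons sc rest ih =>
    rw [List.foldl_cons, List.flatMap_cons, List.foldl_append, ih, inner_foldl_eq]

theorem flat_filterSum (items : List (Int × Int)) (die : List Int) (v : Int) :
    (((items.flatMap (fun sc => die.map (fun f => (sc.1 + f, sc.2)))).filter
          (fun p => p.1 = v)).map (fun p => p.2)).sum
      = (items.map (fun p => p.2 * ((die.countP (fun f => decide (p.1 + f = v))) : Int))).sum := by
  induction items with
  | nil => simp
  | cons sc rest ih =>
    rw [List.flatMap_cons, List.filter_append, List.map_append, List.sum_append, ih]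
    congr 1
    rw [List.filter_map, List.map_map]
    have : ((die.filter (fun f => decide (sc.1 + f = v))).map
        ((fun p => p.2) ∘ (fun f => (sc.1 + f, sc.2)))).sum
        = ((die.filter (fun f => decide (sc.1 + f = v))).map (fun _ => sc.2)).sum := rfl
    rw [show ((fun p => decide (p.1 = v)) ∘ (fun f => (sc.1 + f, sc.2)))
        = (fun f => decide (sc.1 + f = v)) from rfl, this]
    rw [List.map_const', List.sum_replicate]
    simp only [List.countP_eq_length_filter, nsmul_eq_mul]
    push_cast
    ring

theorem count_flatMap_int (S : List Int) (h : Int → List Int) (v : Int) :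
    (((S.flatMap h).count v : Nat) : Int) = (S.map (fun s => (((h s).count v : Nat) : Int))).sum := by
  induction S with
  | nil => simp
  | cons s t ih => rw [List.flatMap_cons, List.count_append]; push_cast [ih]; simp

theorem count_map_add (die : List Int) (s v : Int) :
    (die.map (fun f => s + f)).count v = die.countP (fun f => decide (s + f = v)) := by
  induction die with
  | nil => simp
  | cons f rest ih =>
    simp only [List.map_cons, List.count_cons, List.countP_cons, ih]
    by_cases h : s + f = v
    · simp [h]
    · simp [h, fun hh : v = s + f => h hh.symm]
def DInv (d : PySem.Dict Int Int) (S : List Int) : Prop :=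
  d.keys.Nodup ∧ ∀ v, d.getD v 0 = (S.count v : Int)

theorem dist_step (d : PySem.Dict Int Int) (S : List Int) (die : List Int)
    (h : DInv d S) :
    DInv (d.items.foldl
        (fun nd sc =>
          die.foldl (fun nd f => nd.insert (sc.1 + f) (nd.getD (sc.1 + f) 0 + sc.2)) nd)
        PySem.Dict.empty)
      (S.flatMap (fun s => die.map (fun f => s + f))) := by
  rw [nested_foldl_eq]
  constructor
  · exact PySem.Dict.nodup_keys_foldl_insert_key _ Prod.fst _ _ PySem.Dict.nodup_keys_empty
  · intro v
    rw [getD_foldl_insertAdd, PySem.Dict.getD_empty, zero_add, flat_filterSum]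
    have hitems : ∀ w, ((d.items.filter (fun p => p.1 = w)).map (fun p => p.2)).sum
        = (S.count w : Int) := by
      intro w
      obtain ⟨l⟩ := d
      exact (filterSum_eq_getD l w h.1).trans (h.2 w)
    rw [weighted_sum d.items S (fun s => ((die.countP (fun f => decide (s + f = v)) : Nat) : Int)) (by exact h.1) hitems, count_flatMap_int]
    rw [List.map_congr_left (l := S) (f := fun s => ((die.countP (fun f => decide (s + f = v)) : Nat) : Int))
      (g := fun s => (((die.map (fun f => s + f)).count v : Nat) : Int))
      (fun s _ => by simp only [count_map_add])]

def sumsOf (ls : List (List Int)) : List Int :=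
  ls.foldl (fun acc die => acc.flatMap (fun s => die.map (fun f => s + f))) [0]

theorem dist_master (dice : List (List Int)) :
    ∀ (d : PySem.Dict Int Int) (S : List Int), DInv d S →
    DInv (dice.foldl
        (fun d die =>
          d.items.foldl
            (fun nd sc =>
              die.foldl (fun nd f => nd.insert (sc.1 + f) (nd.getD (sc.1 + f) 0 + sc.2)) nd)
            PySem.Dict.empty) d)
      (dice.foldl (fun acc die => acc.flatMap (fun s => die.map (fun f => s + f))) S) := by
  induction dice with
  | nil => intro d S h; exact h
  | cons die rest ih =>
    intro d S h
    exact ih _ _ (dist_step d S die h)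

theorem dinv_init : DInv (PySem.Dict.ofList [(0, 1)]) [0] := by
  constructor
  · decide
  · intro v
    rw [PySem.Dict.getD_eq_get?_getD]
    by_cases hv : v = 0
    · subst hv
      rw [show (PySem.Dict.ofList [((0:Int), (1:Int))]).get? 0 = some 1 from rfl]
      rfl
    · rw [show PySem.Dict.ofList [((0:Int), (1:Int))] = PySem.Dict.mk [(0, 1)] from rfl,
        PySem.Dict.get?_mk_cons]
      have h0 : ¬ ((0:Int) = v) := fun h => hv h.symm
      simp [h0, List.count_singleton, hv, PySem.Dict.get?]

theorem dinv_distConv (dice : List (List Int)) : DInv (distConv dice) (sumsOf dice) :=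
  dist_master dice _ _ dinv_init

theorem foldl_add_F (l : List (Int × Int)) (F : Int × Int → Int) (t : Int) :
    l.foldl (fun t p => t + F p) t = t + (l.map F).sum := by
  induction l generalizing t with
  | nil => simp
  | cons p rest ih => simp [ih]; ring

theorem foldl_if_add (l : List (Int × Int)) (a : Int) (w : Int) :
    l.foldl (fun w bc => if bc.1 < a then w + bc.2 else w) w
      = w + (l.map (fun bc => bc.2 * (if bc.1 < a then 1 else 0))).sum := by
  induction l generalizing w with
  | nil => simp
  | cons p rest ih =>
    rw [List.foldl_cons, List.map_cons, List.sum_cons]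
    by_cases h : p.1 < a <;> simp [h, ih] <;> ring

theorem sum_indicator (S : List Int) (a : Int) :
    (S.map (fun b => if b < a then (1 : Int) else 0)).sum
      = ((S.countP (fun b => decide (b < a)) : Nat) : Int) := by
  induction S with
  | nil => simp
  | cons b t ih =>
    rw [List.map_cons, List.sum_cons, List.countP_cons, ih]
    by_cases h : b < a <;> simp [h] <;> push_cast <;> ring

theorem filterSum_of_DInv (d : PySem.Dict Int Int) (S : List Int) (h : DInv d S) (w : Int) :
    ((d.items.filter (fun p => p.1 = w)).map (fun p => p.2)).sum = (S.count w : Int) := by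
  obtain ⟨hnd, hc⟩ := h
  obtain ⟨l⟩ := d
  exact (filterSum_eq_getD l w hnd).trans (hc w)

theorem count_alt_eq_pairCount (A B : List (List Int)) :
    count_alt A B = pairCount (sumsOf A) (sumsOf B) := by
  have hA := dinv_distConv A
  have hB := dinv_distConv B
  have hitemsB := filterSum_of_DInv _ _ hB
  have hitemsA := filterSum_of_DInv _ _ hA
  show (distConv A).items.foldl
      (fun total ac =>
        total + ac.2 * ((distConv B).items.foldl
          (fun w bc => if bc.1 < ac.1 then w + bc.2 else w) 0)) 0
    = pairCount (sumsOf A) (sumsOf B)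
  rw [foldl_add_F ((distConv A).items)
    (fun ac => ac.2 * ((distConv B).items.foldl
      (fun w bc => if bc.1 < ac.1 then w + bc.2 else w) 0)), zero_add]
  have hinner : ∀ a : Int, (distConv B).items.foldl
      (fun w bc => if bc.1 < a then w + bc.2 else w) 0
      = (((sumsOf B).countP (fun b => decide (b < a)) : Nat) : Int) := by
    intro a
    rw [foldl_if_add, zero_add,
      weighted_sum ((distConv B).items) (sumsOf B) (fun b => if b < a then 1 else 0) hB.1 hitemsB,
      sum_indicator]
  rw [List.map_congr_left (l := (distConv A).items)
    (g := fun ac => ac.2 * (((sumsOf B).countP (fun b => decide (b < ac.1)) : Nat) : Int))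
    (fun ac _ => by rw [hinner ac.1]),
    weighted_sum ((distConv A).items) (sumsOf A)
      (fun a => (((sumsOf B).countP (fun b => decide (b < a)) : Nat) : Int)) hA.1 hitemsA]
  rfl

theorem grpA_spec (la : List Int) (v : Int) (i : Nat) (c : Int) :
    i ≤ (grpA la v i c).2 ∧
    (grpA la v i c).1 = c + (((grpA la v i c).2 - i : Nat) : Int) ∧
    (∀ k (hk : k < la.length), i < k → k ≤ (grpA la v i c).2 → la[k] = v) ∧
    (∀ h : (grpA la v i c).2 + 1 < la.length, la[(grpA la v i c).2 + 1]'h ≠ v) := by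
  unfold grpA
  split
  next h =>
    split
    next hv =>
      obtain ⟨h1, h2, h3, h4⟩ := grpA_spec la v (i + 1) (c + 1)
      refine ⟨by omega, by rw [h2]; push_cast; omega, ?_, h4⟩
      intro k hk hik hk2
      by_cases hki : k = i + 1
      · subst hki; exact hv
      · exact h3 k hk (by omega) hk2
    next hv => exact ⟨le_refl i, by simp, fun k hk h1 h2 => absurd (Nat.le_antisymm h2 h1.le) (by omega), fun h => by simpa using hv⟩
  next h =>
    exact ⟨le_refl i, by simp, fun k hk h1 h2 => absurd (Nat.le_antisymm h2 h1.le) (by omega), fun hh => absurd hh (by omega)⟩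
  termination_by la.length - i
  decreasing_by omega

theorem advB_spec (lb : List Int) (v : Int) (j : Nat) :
    j ≤ advB lb v j ∧
    (j ≤ lb.length → advB lb v j ≤ lb.length) ∧
    (∀ k (hk : k < lb.length), j ≤ k → k < advB lb v j → v ≤ lb[k]) ∧
    (∀ h : advB lb v j < lb.length, lb[advB lb v j] < v) := by
  unfold advB
  split
  next h =>
    split
    next hv =>
      exact ⟨le_refl j, fun _ => by omega, fun k hk h1 h2 => absurd (Nat.lt_of_lt_of_le h2 h1) (by omega), fun _ => hv⟩
    next hv =>
      obtain ⟨h1, h2, h3, h4⟩ := advB_spec lb v (j + 1)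
      refine ⟨by omega, fun _ => h2 (by omega), ?_, h4⟩
      intro k hk hjk hk2
      by_cases hkj : k = j
      · subst hkj; omega
      · exact h3 k hk (by omega) hk2
  next h =>
    exact ⟨le_refl j, fun hh => hh, fun k hk h1 h2 => absurd (Nat.lt_of_lt_of_le h2 h1) (by omega), fun hh => absurd hh (by omega)⟩
  termination_by lb.length - j
  decreasing_by omega

theorem countP_drop_advB (lb : List Int) (v : Int) (iB : Nat)
    (hB : (lb.drop iB).Pairwise (fun a b => b ≤ a)) (hle : iB ≤ lb.length) :
    (((lb.drop iB).countP (fun b => decide (b < v)) : Nat) : Int)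
      = (lb.length : Int) - (advB lb v iB : Int) := by
  rw [advB]
  split
  next h =>
    rw [List.drop_eq_getElem_cons h] at hB ⊢
    rw [List.pairwise_cons] at hB
    split
    next hv =>
      have hall : ∀ x ∈ lb[iB] :: lb.drop (iB + 1), decide (x < v) = true := by
        intro x hx
        rcases List.mem_cons.mp hx with hx | hx
        · subst hx; simpa using hv
        · have := hB.1 x hx; simp; omega
      rw [List.countP_eq_length.mpr hall]
      simp [List.length_drop]
      omega
    next hv =>
      rw [List.countP_cons]
      have : decide (lb[iB] < v) = false := by simp; omega
      rw [this]
      have := countP_drop_advB lb v (iB + 1) hB.2 (by omega)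
      push_cast at this ⊢
      omega
  next h =>
    have : iB = lb.length := by omega
    subst this
    simp
  termination_by lb.length - iB
  decreasing_by omega

theorem grpA_lt (la : List Int) (v : Int) (i : Nat) (c : Int) (h : i < la.length) :
    (grpA la v i c).2 < la.length := by
  rw [grpA]
  split
  next hg =>
    split
    next => exact grpA_lt la v (i + 1) (c + 1) hg
    next => exact h
  next => exact h
  termination_by la.length - i
  decreasing_by omega

theorem loopA_spec (la lb : List Int) (iA iB : Nat) (acc : Int)
    (hA : (la.drop iA).Pairwise (fun a b => b ≤ a))
    (hB : (lb.drop iB).Pairwise (fun a b => b ≤ a))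
    (hble : iB ≤ lb.length) :
    loopA la lb iA iB acc = acc + pairCount (la.drop iA) (lb.drop iB) := by
  rw [loopA]
  split
  next h =>
    obtain ⟨hAlt, hBlt⟩ := h
    set v := la[iA]'hAlt with hv
    obtain ⟨hg1, hg2, hg3, hg4⟩ := grpA_spec la v iA 1
    have hglt : (grpA la v iA 1).2 < la.length := grpA_lt la v iA 1 hAlt
    set i' := (grpA la v iA 1).2 with hi'
    obtain ⟨ha1, ha2, ha3, ha4⟩ := advB_spec lb v iB
    set jB := advB lb v iB with hjB
    have hjle : jB ≤ lb.length := ha2 hble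
    -- decompositions
    have hdropA : (la.drop iA).take (i' + 1 - iA) ++ la.drop (i' + 1) = la.drop iA := by
      rw [show la.drop (i' + 1) = (la.drop iA).drop (i' + 1 - iA) by
        rw [List.drop_drop]; congr 1; omega]
      exact List.take_append_drop _ _
    have hdropB : (lb.drop iB).take (jB - iB) ++ lb.drop jB = lb.drop iB := by
      rw [show lb.drop jB = (lb.drop iB).drop (jB - iB) by
        rw [List.drop_drop]; congr 1; omega]
      exact List.take_append_drop _ _
    -- run elements are all v
    have hrunlen : ((la.drop iA).take (i' + 1 - iA)).length = i' + 1 - iA := by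
      rw [List.length_take, List.length_drop]; omega
    have hrun : ∀ x ∈ (la.drop iA).take (i' + 1 - iA), x = v := by
      intro x hx
      obtain ⟨t, ht, hxe⟩ := List.mem_iff_getElem.mp hx
      rw [hrunlen] at ht
      have hxe' : x = la[iA + t]'(by omega) := by
        rw [← hxe, List.getElem_take, List.getElem_drop]
      rcases Nat.eq_zero_or_pos t with h0 | h0
      · subst h0; rw [hxe']; simp [hv]
      · rw [hxe']; exact hg3 (iA + t) (by omega) (by omega) (by omega)
    -- mid elements of B are ≥ v
    have hmid : ∀ x ∈ (lb.drop iB).take (jB - iB), v ≤ x := by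
      intro x hx
      obtain ⟨t, ht, hxe⟩ := List.mem_iff_getElem.mp hx
      rw [List.length_take, List.length_drop] at ht
      have hxe' : x = lb[iB + t]'(by omega) := by
        rw [← hxe, List.getElem_take, List.getElem_drop]
      rw [hxe']
      exact ha3 (iB + t) (by omega) (by omega) (by omega)
    -- rest elements of A are ≤ v
    have hrest : ∀ a ∈ la.drop (i' + 1), a ≤ v := by
      intro a haa
      have hmem : a ∈ la.drop (iA + 1) := by
        have : la.drop (i' + 1) = (la.drop (iA + 1)).drop (i' - iA) := by
          rw [List.drop_drop]; congr 1; omega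
        exact List.drop_subset _ _ (this ▸ haa)
      have hcons := hA
      rw [List.drop_eq_getElem_cons hAlt, List.pairwise_cons] at hcons
      exact hcons.1 a hmem
    -- countP for the run value
    have hcv : (((lb.drop iB).countP (fun b => decide (b < v)) : Nat) : Int)
        = (lb.length : Int) - (jB : Int) := countP_drop_advB lb v iB hB hble
    -- rest: counting against drop iB equals counting against drop jB
    have hFcong : ∀ a ∈ la.drop (i' + 1),
        (((lb.drop iB).countP (fun b => decide (b < a)) : Nat) : Int)
          = (((lb.drop jB).countP (fun b => decide (b < a)) : Nat) : Int) := by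
      intro a haa
      have hzero : ((lb.drop iB).take (jB - iB)).countP (fun b => decide (b < a)) = 0 := by
        rw [List.countP_eq_zero]
        intro x hx
        have := hmid x hx
        have := hrest a haa
        simp; omega
      conv_lhs => rw [← hdropB]
      rw [List.countP_append, hzero]
      simp
    -- inductive call
    have hih := loopA_spec la lb (i' + 1) jB
      (acc + (grpA la v iA 1).1 * ((lb.length : Int) - (jB : Int)))
      (hA.sublist (by rw [← hdropA]; exact List.sublist_append_right _ _))
      (hB.sublist (by rw [← hdropB]; exact List.sublist_append_right _ _))
      hjle
    rw [hih]
    -- assemble sums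
    have hsplit : pairCount (la.drop iA) (lb.drop iB)
        = (grpA la v iA 1).1 * ((lb.length : Int) - (jB : Int))
          + pairCount (la.drop (i' + 1)) (lb.drop jB) := by
      rw [show pairCount (la.drop iA) (lb.drop iB)
          = pairCount ((la.drop iA).take (i' + 1 - iA)) (lb.drop iB)
            + pairCount (la.drop (i' + 1)) (lb.drop iB) by
        unfold pairCount
        rw [← hdropA, List.map_append, List.sum_append]
        rw [hdropA]]
      congr 1
      · -- run part
        unfold pairCount
        rw [List.map_congr_left (l := (la.drop iA).take (i' + 1 - iA))
          (f := fun a => (((lb.drop iB).countP (fun b => decide (b < a)) : Nat) : Int))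
          (g := fun _ => (((lb.drop iB).countP (fun b => decide (b < v)) : Nat) : Int))
          (fun x hx => by rw [hrun x hx])]
        rw [List.map_const', List.sum_replicate, hrunlen, hcv, nsmul_eq_mul, hg2]
        have hc' : ((i' + 1 - iA : Nat) : Int) = 1 + ((i' - iA : Nat) : Int) := by omega
        rw [hc']
      · -- rest part
        unfold pairCount
        rw [List.map_congr_left (fun a ha => hFcong a ha)]
    rw [hsplit]
    ring
  next h =>
    rcases Nat.lt_or_ge iA la.length with hlt | hge
    · have : lb.length ≤ iB := by omega
      rw [List.drop_eq_nil_of_le this]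
      simp [pairCount]
    · rw [List.drop_eq_nil_of_le hge]
      simp [pairCount]
  termination_by la.length - iA
  decreasing_by
    have := (grpA_spec la (la[iA]'hAlt) iA 1).1
    omega

theorem pairCount_perm (la la' lb lb' : List Int)
    (hA : la'.Perm la) (hB : lb'.Perm lb) :
    pairCount la' lb' = pairCount la lb := by
  unfold pairCount
  have hF : (fun a => (((lb'.countP (fun b => decide (b < a)) : Nat) : Int)))
      = (fun a => (((lb.countP (fun b => decide (b < a)) : Nat) : Int))) := by
    funext a
    rw [hB.countP_eq]
  rw [hF]
  exact (hA.map _).sum_eq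

theorem count_eq_pairCount (A B : List (List Int)) :
    count A B = pairCount (sumsOf A) (sumsOf B) := by
  unfold count
  have hpA : (PySem.List.sorted ((pyProd A).map (fun t => t.sum)) (fun x => x) true).Pairwise
      (fun a b => b ≤ a) := by
    simpa using PySem.List.sorted_pairwise_rev ((pyProd A).map (fun t => t.sum)) (fun x => x)
  have hpB : (PySem.List.sorted ((pyProd B).map (fun t => t.sum)) (fun x => x) true).Pairwise
      (fun a b => b ≤ a) := by
    simpa using PySem.List.sorted_pairwise_rev ((pyProd B).map (fun t => t.sum)) (fun x => x)
  rw [loopA_spec _ _ 0 0 0 (by simpa using hpA) (by simpa using hpB) (by omega), zero_add,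
    List.drop_zero, List.drop_zero]
  have hsA : ((pyProd A).map (fun t => t.sum)).Perm (sumsOf A) := by
    unfold pyProd sumsOf
    rw [map_sum_pyProd]
    rfl
  have hsB : ((pyProd B).map (fun t => t.sum)).Perm (sumsOf B) := by
    unfold pyProd sumsOf
    rw [map_sum_pyProd]
    rfl
  exact pairCount_perm _ _ _ _
    ((PySem.List.sorted_perm _ _ _).trans hsA)
    ((PySem.List.sorted_perm _ _ _).trans hsB)

-- ===== VERDICT (by name: the statement is the Claim_ definition above) =====
theorem count_spec : Claim_equal_count := by
  intro A B _
  unfold Spec_count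
  rw [count_eq_pairCount, count_alt_eq_pairCount]
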